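-- pv_equiv track=rewrite | github.com/Yogeshwaran-D/PROBLEM-OF-THE-DAY | LEET-CODE/2285. Maximum Total Importance of Roads .py | maximumImportance
-- ===== SOURCE A (Python) =====
-- def maximumImportance(n, roads) :
--     edg_count=[0]*n
--     for n1,n2 in roads:
--         edg_count[n1]+=1
--         edg_count[n2]+=1
--     res=0
--     label=1
--     for count in sorted(edg_count):
--         res+=label*count
--         label+=1
--     return res
-- ===== SOURCE B (Python) =====
-- def maximumImportance(n, roads):
--     deg = [0] * n
--     for x in (e for road in roads for e in road):
--         deg[x] += 1
--     m = max(deg, default=0)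
--     freq = {}
--     for d in deg:
--         freq[d] = freq.get(d, 0) + 1
--     res = 0
--     label = 1
--     for d in range(m + 1):
--         f = freq.get(d, 0)
--         res += d * (f * label + f * (f - 1) // 2)
--         label += f
--     return res
-- ===== Notes on version B (the rewrite author's own statement) =====
-- stated objective: alternative
-- what changed: Degrees are counted over the flattened endpoint stream instead of per-road pairs, and the comparison sort is replaced by a counting sort whose per-degree contribution is computed with a closed-form consecutive-label sum (f*label + f*(f-1)//2) instead of iterating over the sorted list.
import Mathlib
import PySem

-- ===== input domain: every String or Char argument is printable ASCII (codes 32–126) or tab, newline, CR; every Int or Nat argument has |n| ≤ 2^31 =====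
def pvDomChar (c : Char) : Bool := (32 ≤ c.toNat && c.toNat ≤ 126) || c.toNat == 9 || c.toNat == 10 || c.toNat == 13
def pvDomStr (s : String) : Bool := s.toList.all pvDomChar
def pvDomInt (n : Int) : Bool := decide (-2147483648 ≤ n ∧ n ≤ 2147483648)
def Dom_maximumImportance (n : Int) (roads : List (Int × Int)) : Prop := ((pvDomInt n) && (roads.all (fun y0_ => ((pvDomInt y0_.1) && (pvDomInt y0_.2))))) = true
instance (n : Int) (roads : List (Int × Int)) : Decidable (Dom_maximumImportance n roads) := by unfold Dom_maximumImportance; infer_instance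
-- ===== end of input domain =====

-- B counts degrees over the flattened endpoint stream and replaces the comparison sort
-- by a counting sort whose per-degree block is summed in closed form (no inner loop);
-- return-value equivalence on inputs where A does not raise IndexError.

-- ===== PORT A =====
-- pySetD/pyGetD are exact under Pre_ (every road endpoint is a valid Python index).
def maximumImportance (n : Int) (roads : List (Int × Int)) : Int :=
  let ec := roads.foldl (fun ec p =>
      let ec1 := PySem.List.pySetD ec p.1 (PySem.List.pyGetD ec p.1 0 + 1)
      PySem.List.pySetD ec1 p.2 (PySem.List.pyGetD ec1 p.2 0 + 1))
    (List.replicate n.toNat (0 : Int))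
  -- sorted(edg_count): a stable sort of ints by ≤ — List.mergeSort is exact here
  -- (the elements are their own keys, so stability cannot be observed)
  ((ec.mergeSort (fun a b => a ≤ b)).foldl
      (fun (s : Int × Int) c => (s.1 + s.2 * c, s.2 + 1)) (0, 1)).1

-- ===== PORT B =====
def maximumImportance_alt (n : Int) (roads : List (Int × Int)) : Int :=
  -- flattened endpoint stream: for x in (e for road in roads for e in road)
  let deg := (roads.flatMap (fun road => [road.1, road.2])).foldl
      (fun dg x => PySem.List.pySetD dg x (PySem.List.pyGetD dg x 0 + 1))
      (List.replicate n.toNat (0 : Int))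
  let m := PySem.List.maxD deg (fun x => x) 0
  let freq := deg.foldl (fun d x => d.insert x (d.getD x 0 + 1)) PySem.Dict.empty
  -- counting sort with a closed-form block sum: labels label..label+f-1 sum to
  -- f*label + f*(f-1)//2
  ((PySem.List.pyRange 0 (m + 1) 1).foldl
      (fun (s : Int × Int) d =>
        let f := freq.getD d 0
        (s.1 + d * (f * s.2 + PySem.Int.floordiv (f * (f - 1)) 2), s.2 + f))
      (0, 1)).1

-- ===== PRECONDITION & SPEC =====
-- Pre_: every road endpoint is a valid Python index into the degree list of length
-- max(n,0) (otherwise A raises IndexError).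
def Pre_maximumImportance (n : Int) (roads : List (Int × Int)) : Prop :=
  ∀ p ∈ roads, PySem.Raise.InRange n.toNat p.1 ∧ PySem.Raise.InRange n.toNat p.2
instance (n : Int) (roads : List (Int × Int)) : Decidable (Pre_maximumImportance n roads) := by
  unfold Pre_maximumImportance; infer_instance

def pvWitness_maximumImportance : Int × (List (Int × Int)) := (3, [(0, 1), (1, 2), (0, 2)])

def Spec_maximumImportance (n : Int) (roads : List (Int × Int)) (out : Int) : Prop := out = maximumImportance_alt n roads
instance (n : Int) (roads : List (Int × Int)) (out : Int) : Decidable (Spec_maximumImportance n roads out) := by unfold Spec_maximumImportance; infer_instance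

-- ===== CLAIM (what is proved, stated in full; the proofs are below) =====
def Claim_equal_maximumImportance : Prop := ∀ (n : Int) (roads : List (Int × Int)), Dom_maximumImportance n roads → Pre_maximumImportance n roads → Spec_maximumImportance n roads (maximumImportance n roads)

-- ===== LEMMAS AND PROOFS =====

-- every element of the degree list is nonnegative (invariant of the counting loop)
lemma pv_mem_pySetD {x v : Int} {xs : List Int} {i : Int}
    (h : x ∈ PySem.List.pySetD xs i v) : x = v ∨ x ∈ xs := by
  unfold PySem.List.pySetD PySem.List.pySet? at h
  cases hk : PySem.List.pyIdx? xs.length i with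
  | none => simp [hk] at h; exact Or.inr h
  | some k =>
      simp [hk] at h
      rcases List.mem_or_eq_of_mem_set h with h' | h'
      · exact Or.inr h'
      · exact Or.inl h'

lemma pv_pyGetD_nonneg {xs : List Int} {i : Int}
    (h : ∀ x ∈ xs, 0 ≤ x) : 0 ≤ PySem.List.pyGetD xs i 0 := by
  unfold PySem.List.pyGetD
  cases hg : PySem.List.pyGet? xs i with
  | none => simp
  | some v => simpa using h v (PySem.List.mem_of_pyGet?_eq_some xs hg)

-- the flattened single-increment loop computes the same list as A's paired loop
lemma pv_foldl_flatMap {α β γ : Type} (l : List α) (f : α → List β)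
    (g : γ → β → γ) (s : γ) :
    (l.flatMap f).foldl g s = l.foldl (fun s x => (f x).foldl g s) s := by
  induction l generalizing s with
  | nil => rfl
  | cons a t ih => simp [List.flatMap_cons, List.foldl_append, ih]

lemma pv_deg_eq (roads : List (Int × Int)) (init : List Int) :
    (roads.flatMap (fun road => [road.1, road.2])).foldl
        (fun dg x => PySem.List.pySetD dg x (PySem.List.pyGetD dg x 0 + 1)) init
      = roads.foldl (fun ec p =>
          let ec1 := PySem.List.pySetD ec p.1 (PySem.List.pyGetD ec p.1 0 + 1)
          PySem.List.pySetD ec1 p.2 (PySem.List.pyGetD ec1 p.2 0 + 1)) init := by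
  rw [pv_foldl_flatMap]
  simp [List.foldl]

lemma pv_ec_nonneg (roads : List (Int × Int)) (init : List Int)
    (h0 : ∀ x ∈ init, (0:Int) ≤ x) :
    ∀ x ∈ roads.foldl (fun ec p =>
      let ec1 := PySem.List.pySetD ec p.1 (PySem.List.pyGetD ec p.1 0 + 1)
      PySem.List.pySetD ec1 p.2 (PySem.List.pyGetD ec1 p.2 0 + 1)) init, (0:Int) ≤ x := by
  induction roads generalizing init with
  | nil => simpa using h0
  | cons p t ih =>
      refine ih _ ?_
      intro x hx
      rcases pv_mem_pySetD hx with rfl | hx'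
      · have : 0 ≤ PySem.List.pyGetD (PySem.List.pySetD init p.1 (PySem.List.pyGetD init p.1 0 + 1)) p.2 0 := by
          apply pv_pyGetD_nonneg
          intro y hy
          rcases pv_mem_pySetD hy with rfl | hy'
          · have := pv_pyGetD_nonneg (i := p.1) h0; omega
          · exact h0 y hy'
        omega
      · rcases pv_mem_pySetD hx' with rfl | hx''
        · have := pv_pyGetD_nonneg (i := p.1) h0; omega
        · exact h0 x hx''

-- the counting-sort emission order, as a flat list
def pvCS (ec : List Int) (K : Nat) : List Int :=
  (List.range K).flatMap (fun (d : Nat) => List.replicate (ec.count ((d : Int))) (((d : Int)) : Int))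

lemma pv_count_pvCS (ec : List Int) (K : Nat) (x : Int) :
    (pvCS ec K).count x = if 0 ≤ x ∧ x < (K : Int) then ec.count x else 0 := by
  induction K with
  | zero =>
      unfold pvCS
      simp only [List.range_zero, List.flatMap_nil, List.count_nil]
      rw [if_neg (by push_cast; omega)]
  | succ k ih =>
      unfold pvCS at *
      rw [List.range_succ, List.flatMap_append, List.count_append, ih]
      simp only [List.flatMap_cons, List.flatMap_nil, List.append_nil, List.count_replicate]
      by_cases hx : x = (k : Int)
      · subst hx
        have h1 : ¬(0 ≤ (k:Int) ∧ (k:Int) < (k:Int)) := by omega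
        have h2 : 0 ≤ (k:Int) ∧ (k:Int) < (((k+1 : Nat)):Int) := by push_cast; omega
        rw [if_neg h1, if_pos h2]
        simp
      · simp only [beq_iff_eq]
        have hkx : ¬((k:Int) = x) := fun h => hx h.symm
        rw [if_neg hkx]
        push_cast
        split_ifs <;> omega

lemma pv_mem_pvCS {ec : List Int} {K : Nat} {x : Int} (h : x ∈ pvCS ec K) :
    0 ≤ x ∧ x < (K : Int) := by
  rcases List.mem_flatMap.mp h with ⟨d, hd, hx⟩
  rcases List.eq_of_mem_replicate hx with rfl
  have := List.mem_range.mp hd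
  constructor
  · positivity
  · exact_mod_cast this

lemma pv_pvCS_perm (ec : List Int) (K : Nat)
    (hb : ∀ x ∈ ec, 0 ≤ x ∧ x < (K : Int)) : (pvCS ec K).Perm ec := by
  rw [List.perm_iff_count]
  intro a
  rw [pv_count_pvCS]
  split_ifs with h
  · rfl
  · symm
    rw [List.count_eq_zero]
    intro ha
    exact h (hb a ha)

lemma pv_pvCS_pairwise (ec : List Int) (K : Nat) : (pvCS ec K).Pairwise (· ≤ ·) := by
  induction K with
  | zero => simp [pvCS]
  | succ k ih =>
      unfold pvCS at *
      rw [List.range_succ, List.flatMap_append, List.pairwise_append]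
      refine ⟨ih, ?_, ?_⟩
      · simp only [List.flatMap_cons, List.flatMap_nil, List.append_nil]
        exact List.pairwise_replicate.mpr (Or.inr le_rfl)
      · intro a ha b hb
        have h1 := pv_mem_pvCS (ec := ec) (K := k) ha
        simp only [List.flatMap_cons, List.flatMap_nil, List.append_nil] at hb
        rcases List.eq_of_mem_replicate hb with rfl
        omega

-- the closed-form sum of one counting-sort block: labels s.2 .. s.2+k-1 on value v
lemma pv_block (k : Nat) (v : Int) (s : Int × Int) :
    (List.replicate k v).foldl (fun (s : Int × Int) c => (s.1 + s.2 * c, s.2 + 1)) s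
      = (s.1 + v * ((k : Int) * s.2 + ((k * (k - 1) / 2 : Nat) : Int)), s.2 + k) := by
  induction k generalizing s with
  | zero => simp
  | succ k ih =>
      rw [List.replicate_succ, List.foldl_cons, ih]
      have hev : 2 * (k * (k - 1) / 2) = k * (k - 1) :=
        Nat.two_mul_div_two_of_even (Nat.even_mul_pred_self k)
      have hev' : 2 * ((k + 1) * (k + 1 - 1) / 2) = (k + 1) * (k + 1 - 1) :=
        Nat.two_mul_div_two_of_even (Nat.even_mul_pred_self (k + 1))
      have hp : (k + 1) * (k + 1 - 1) = k * (k - 1) + 2 * k := by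
        cases k with
        | zero => rfl
        | succ j => simp; ring
      have hT : (k + 1) * (k + 1 - 1) / 2 = k * (k - 1) / 2 + k := by omega
      have : s.2 * v + v * ((k:Int) * (s.2 + 1) + ((k * (k - 1) / 2 : Nat) : Int))
           = v * (((k+1 : Nat) : Int) * s.2 + (((k+1) * (k+1-1) / 2 : Nat) : Int)) := by
        rw [hT]; push_cast; ring
      refine Prod.ext ?_ ?_
      · simp only []
        rw [add_assoc, this]
      · simp only []
        push_cast; ring

-- floordiv form of the triangular number, for f = (k : Nat)
lemma pv_tri (k : Nat) :
    PySem.Int.floordiv ((k : Int) * ((k : Int) - 1)) 2 = ((k * (k - 1) / 2 : Nat) : Int) := by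
  cases k with
  | zero => decide
  | succ j =>
      have h1 : ((j+1 : Nat) : Int) * (((j+1 : Nat) : Int) - 1) = (((j+1) * j : Nat) : Int) := by
        push_cast; ring
      rw [h1, PySem.Int.floordiv_eq_ediv_of_pos (by norm_num)]
      have h2 : (((j+1) * j / 2 : Nat) : Int) = (((j+1) * j : Nat) : Int) / 2 :=
        Int.natCast_div ((j+1)*j) 2
      simp only [Nat.add_sub_cancel]
      exact h2.symm

lemma pv_foldl_flatMap' {α β γ : Type} (l : List α) (f : α → List β)
    (g : γ → β → γ) (s : γ) :
    (l.flatMap f).foldl g s = l.foldl (fun s x => (f x).foldl g s) s :=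
  pv_foldl_flatMap l f g s

-- max bound: every element of ec is ≤ maxD ec id 0
lemma pv_le_maxD {xs : List Int} {x : Int} (hx : x ∈ xs) :
    x ≤ PySem.List.maxD xs (fun x => x) 0 := by
  unfold PySem.List.maxD
  cases h : PySem.List.max? xs (fun x => x) with
  | none => rw [(PySem.List.max?_eq_none_iff xs _).mp h] at hx; cases hx
  | some m => simpa using PySem.List.max?_isMax h x hx

lemma pv_main (ec : List Int) (h0 : ∀ x ∈ ec, (0:Int) ≤ x) :
    ((ec.mergeSort (fun a b => a ≤ b)).foldl
        (fun (s : Int × Int) c => (s.1 + s.2 * c, s.2 + 1)) (0, 1)).1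
      = ((PySem.List.pyRange 0 (PySem.List.maxD ec (fun x => x) 0 + 1) 1).foldl
          (fun (s : Int × Int) d =>
            let f := (ec.foldl (fun d x => d.insert x (d.getD x 0 + 1)) PySem.Dict.empty).getD d 0
            (s.1 + d * (f * s.2 + PySem.Int.floordiv (f * (f - 1)) 2), s.2 + f))
          (0, 1)).1 := by
  set m := PySem.List.maxD ec (fun x => x) 0 with hm
  have hm0 : 0 ≤ m := by
    by_cases hnil : ec = []
    · subst hnil; rw [hm]; simp [PySem.List.maxD_nil]
    · exact h0 _ (PySem.List.maxD_mem ec _ 0 hnil)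
  set K := (m + 1).toNat with hK
  have hKm : ((K : Nat) : Int) = m + 1 := Int.toNat_of_nonneg (by omega)
  have hb : ∀ x ∈ ec, 0 ≤ x ∧ x < (K : Int) := by
    intro x hx
    have hle := pv_le_maxD (xs := ec) hx
    rw [← hm] at hle
    exact ⟨h0 x hx, by omega⟩
  have hsorted : ec.mergeSort (fun a b => a ≤ b) = pvCS ec K := by
    refine List.Perm.eq_of_pairwise (le := (· ≤ ·))
      (fun a b _ _ h1 h2 => le_antisymm h1 h2) ?_ (pv_pvCS_pairwise ec K)
      (((List.mergeSort_perm ec _)).trans (pv_pvCS_perm ec K hb).symm)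
    simpa using List.pairwise_mergeSort' (fun a b => a ≤ b) ec
  have hfreq : ∀ d : Int,
      (ec.foldl (fun d x => d.insert x (d.getD x 0 + 1)) PySem.Dict.empty).getD d 0
        = (ec.count d : Int) := by
    intro d
    rw [PySem.Dict.foldl_insert_getD_add_one_eq_counter, PySem.Dict.getD_counter]
  rw [hsorted]
  unfold pvCS
  rw [pv_foldl_flatMap']
  rw [← hKm, PySem.List.pyRange_zero_natCast K, List.foldl_map]
  have hstep : (fun (s : Int × Int) (d : Nat) =>
        (List.replicate (ec.count ((d : Int))) ((d : Int))).foldl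
          (fun (s : Int × Int) c => (s.1 + s.2 * c, s.2 + 1)) s)
      = (fun (s : Int × Int) (d : Nat) =>
        let f := (ec.foldl (fun d x => d.insert x (d.getD x 0 + 1)) PySem.Dict.empty).getD (d : Int) 0
        (s.1 + (d : Int) * (f * s.2 + PySem.Int.floordiv (f * (f - 1)) 2), s.2 + f)) := by
    funext s d
    simp only [hfreq]
    rw [pv_block, pv_tri]
  rw [hstep]

-- ===== VERDICT (by name: the statement is the Claim_ definition above) =====
theorem maximumImportance_spec : Claim_equal_maximumImportance := by
  intro n roads _ _
  unfold Spec_maximumImportance maximumImportance maximumImportance_alt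
  rw [pv_deg_eq]
  exact pv_main _ (pv_ec_nonneg roads _ (by intro x hx; rw [List.eq_of_mem_replicate hx]))
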